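-- pv_equiv track=rewrite | github.com/JustinTienken-Harder/cube-reconstruction | src/rubik/string_tools.py | remove_comments
-- ===== SOURCE A (Python) =====
-- def remove_comments(notation_string):
--     lines = notation_string.split("\n")
--     cleaned_lines = []
--     for line in lines:
--         # Remove comments (both styles)
--         comment_start_slash = line.find('\\')
--         comment_start_double = line.find('//')
--
--         if comment_start_slash >= 0:
--             line = line[:comment_start_slash]
--         if comment_start_double >= 0:
--             line = line[:comment_start_double]
--
--         if line.strip():  # Only keep non-empty lines
--             cleaned_lines.append(line)
--     # Join cleaned lines back together
--     return " ".join(cleaned_lines)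
-- ===== SOURCE B (Python) =====
-- def remove_comments(notation_string):
--     # Single streaming state machine over the whole string (no split, no find/slice):
--     # scans characters once, truncating at the first '\' or '//' of each line,
--     # flushing kept non-blank lines at each newline (a sentinel '\n' flushes the last line).
--     kept = []            # completed, kept lines
--     cur = []             # characters of the current line kept so far
--     skipping = False     # inside a comment (until end of line)
--     pending = False      # a lone '/' seen, not yet known to start '//'
--     for ch in notation_string + "\n":
--         if ch == "\n":
--             if not skipping and pending:
--                 cur.append("/")
--             line = "".join(cur)
--             if line.strip():
--                 kept.append(line)
--             cur = []
--             skipping = False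
--             pending = False
--         elif skipping:
--             pass
--         elif ch == "\\":
--             if pending:
--                 cur.append("/")
--                 pending = False
--             skipping = True
--         elif ch == "/":
--             if pending:
--                 skipping = True
--                 pending = False
--             else:
--                 pending = True
--         else:
--             if pending:
--                 cur.append("/")
--                 pending = False
--             cur.append(ch)
--     return " ".join(kept)
-- ===== Notes on version B (the rewrite author's own statement) =====
-- stated objective: alternative
-- what changed: Replaces A's split-into-lines loop with two substring searches (find '\', find '//') and two slices per line by a single streaming character-level state machine over the whole string that truncates each line at the first comment marker and flushes kept non-blank lines at newlines.
import Mathlib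
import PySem

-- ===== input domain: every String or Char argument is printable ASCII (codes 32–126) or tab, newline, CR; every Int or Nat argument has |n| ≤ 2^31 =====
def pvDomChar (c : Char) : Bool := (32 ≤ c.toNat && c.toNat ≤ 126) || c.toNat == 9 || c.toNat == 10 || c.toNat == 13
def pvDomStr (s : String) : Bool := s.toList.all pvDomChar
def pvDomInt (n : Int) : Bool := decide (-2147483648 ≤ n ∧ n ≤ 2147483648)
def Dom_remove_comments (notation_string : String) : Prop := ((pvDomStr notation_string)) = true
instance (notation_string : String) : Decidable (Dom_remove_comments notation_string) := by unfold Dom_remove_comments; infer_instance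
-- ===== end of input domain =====

-- B replaces A's split/find/slice per-line loop by a single streaming character
-- state machine over the whole string (objective: alternative decomposition).

-- ===== PORT A =====
def remove_comments (notation_string : String) : String :=
  let lines := PySem.Chars.splitOn notation_string.toList ['\n']
  let cleaned_lines := lines.foldl (fun cleaned_lines line =>
    let comment_start_slash := PySem.Chars.find line ['\\']
    let comment_start_double := PySem.Chars.find line ['/', '/']
    let line1 := if comment_start_slash ≥ 0 then
        PySem.Chars.slice line none (some comment_start_slash) else line
    let line2 := if comment_start_double ≥ 0 then
        PySem.Chars.slice line1 none (some comment_start_double) else line1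
    if PySem.Chars.strip line2 ≠ [] then cleaned_lines ++ [line2] else cleaned_lines) []
  String.ofList (PySem.Chars.join [' '] cleaned_lines)

-- ===== PORT B =====
-- state = (kept lines, current line so far, skipping a comment, pending lone '/')
def pvStepB (st : List (List Char) × List Char × Bool × Bool) (ch : Char) :
    List (List Char) × List Char × Bool × Bool :=
  let (kept, cur, skipping, pending) := st
  if ch = '\n' then
    let cur := if !skipping && pending then cur ++ ['/'] else cur
    let kept := if PySem.Chars.strip cur ≠ [] then kept ++ [cur] else kept
    (kept, [], false, false)
  else if skipping then (kept, cur, skipping, pending)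
  else if ch = '\\' then
    (kept, if pending then cur ++ ['/'] else cur, true, false)
  else if ch = '/' then
    (if pending then (kept, cur, true, false) else (kept, cur, false, true))
  else
    (kept, (if pending then cur ++ ['/'] else cur) ++ [ch], false, false)

def remove_comments_alt (notation_string : String) : String :=
  let st := (notation_string.toList ++ ['\n']).foldl pvStepB ([], [], false, false)
  String.ofList (PySem.Chars.join [' '] st.1)

-- ===== PRECONDITION & SPEC =====
def Spec_remove_comments (notation_string : String) (out : String) : Prop := out = remove_comments_alt notation_string
instance (notation_string : String) (out : String) : Decidable (Spec_remove_comments notation_string out) := by unfold Spec_remove_comments; infer_instance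

-- ===== CLAIM (what is proved, stated in full; the proofs are below) =====
def Claim_equal_remove_comments : Prop := ∀ (notation_string : String), Dom_remove_comments notation_string → Spec_remove_comments notation_string (remove_comments notation_string)

-- ===== LEMMAS AND PROOFS =====

-- the comment-stripped prefix of one line (specification shared by both proofs)
def pvTrunc : List Char → List Char
  | [] => []
  | c :: l =>
    if c = '\\' then []
    else if c = '/' ∧ l.head? = some '/' then []
    else c :: pvTrunc l

def pvEmit (x : List Char) : List (List Char) :=
  if PySem.Chars.strip x ≠ [] then [x] else []

-- A's per-line computation, named for the proofs
def pvLineA (line : List Char) : List Char :=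
  let i1 := PySem.Chars.find line ['\\']
  let i2 := PySem.Chars.find line ['/', '/']
  let line1 := if i1 ≥ 0 then PySem.Chars.slice line none (some i1) else line
  if i2 ≥ 0 then PySem.Chars.slice line1 none (some i2) else line1

-- splitOn ['\n'] as a plain front recursion
def pvSplit (pre : List Char) : List Char → List (List Char)
  | [] => [pre]
  | c :: r => if c = '\n' then pre :: pvSplit [] r else pvSplit (pre ++ [c]) r

lemma pvGoSplit : ∀ (l : List Char) (fuel : Nat), l.length < fuel → ∀ cur acc,
    PySem.Chars.splitOn.go ['\n'] fuel l cur acc = acc.reverse ++ pvSplit cur.reverse l := by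
  intro l
  induction l with
  | nil =>
    intro fuel hf cur acc
    match fuel, hf with
    | f + 1, _ => simp [PySem.Chars.splitOn.go, pvSplit]
  | cons c r ih =>
    intro fuel hf cur acc
    match fuel, hf with
    | f + 1, hf =>
      by_cases hc : c = '\n'
      · subst hc
        have hp : (['\n'] : List Char).isPrefixOf ('\n' :: r) = true := by simp [List.isPrefixOf]
        simp only [PySem.Chars.splitOn.go, hp, if_pos, List.length_cons,
          List.length_nil, List.drop_succ_cons, List.drop_zero]
        rw [ih f (by simpa using hf) [] (cur.reverse :: acc)]
        simp [pvSplit]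
      · have hp : (['\n'] : List Char).isPrefixOf (c :: r) = false := by
          simp [List.isPrefixOf, Ne.symm hc]
        simp only [PySem.Chars.splitOn.go, hp]
        rw [ih f (by simpa using hf) (c :: cur) acc]
        simp [pvSplit, hc]

lemma pvSplitOn_eq (s : List Char) : PySem.Chars.splitOn s ['\n'] = pvSplit [] s := by
  have := pvGoSplit s (s.length + 1) (by omega) [] []
  simpa [PySem.Chars.splitOn] using this

lemma pvSplit_no_nl {l : List Char} (h : '\n' ∉ l) : ∀ pre, pvSplit pre l = [pre ++ l] := by
  induction l with
  | nil => intro pre; simp [pvSplit]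
  | cons c r ih =>
    intro pre
    simp only [List.mem_cons, not_or] at h
    simp [pvSplit, Ne.symm h.1, ih h.2]

lemma pvSplit_app {a : List Char} (h : '\n' ∉ a) (b : List Char) :
    ∀ pre, pvSplit pre (a ++ '\n' :: b) = (pre ++ a) :: pvSplit [] b := by
  induction a with
  | nil => intro pre; simp [pvSplit]
  | cons c r ih =>
    intro pre
    simp only [List.mem_cons, not_or] at h
    simp [pvSplit, Ne.symm h.1, ih h.2]

lemma pvDecomp : ∀ s : List Char, '\n' ∉ s ∨ ∃ a b, s = a ++ '\n' :: b ∧ '\n' ∉ a := by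
  intro s
  induction s with
  | nil => left; simp
  | cons c r ih =>
    by_cases hc : c = '\n'
    · right; exact ⟨[], r, by simp [hc], by simp⟩
    · rcases ih with h | ⟨a, b, rfl, ha⟩
      · left; simp [Ne.symm hc, h]
      · right; exact ⟨c :: a, b, rfl, by simp [Ne.symm hc, ha]⟩

lemma pvGoShift {sub : List Char} (h : sub ≠ []) : ∀ (t : List Char) (k : Nat),
    PySem.Chars.find.go sub t k =
      if PySem.Chars.find.go sub t 0 = -1 then -1 else PySem.Chars.find.go sub t 0 + k := by
  intro t
  induction t with
  | nil =>
    intro k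
    simp [PySem.Chars.find.go, List.isEmpty_iff, h]
  | cons c r ih =>
    intro k
    by_cases hp : sub.isPrefixOf (c :: r) = true
    · simp [PySem.Chars.find.go, hp]
    · simp only [Bool.not_eq_true] at hp
      have hge : -1 ≤ PySem.Chars.find.go sub r 0 := by
        have := PySem.Chars.neg_one_le_find r sub
        simpa [PySem.Chars.find] using this
      simp only [PySem.Chars.find.go, hp, Bool.false_eq_true, if_false]
      rw [ih (k + 1), ih 1]
      by_cases hm : PySem.Chars.find.go sub r 0 = -1
      · simp [hm]
      · have : ¬ PySem.Chars.find.go sub r 0 + 1 = -1 := by omega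
        simp only [hm, if_false]
        push_cast
        omega

lemma pvFindNil {sub : List Char} (h : sub ≠ []) : PySem.Chars.find [] sub = -1 := by
  simp [PySem.Chars.find, PySem.Chars.find.go, List.isEmpty_iff, h]

lemma pvFindConsPrefix {sub : List Char} {c : Char} {t : List Char}
    (hp : sub.isPrefixOf (c :: t) = true) : PySem.Chars.find (c :: t) sub = 0 := by
  simp [PySem.Chars.find, PySem.Chars.find.go, hp]

lemma pvFindCons {sub : List Char} (h : sub ≠ []) {c : Char} {t : List Char}
    (hnp : sub.isPrefixOf (c :: t) = false) :
    PySem.Chars.find (c :: t) sub =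
      if PySem.Chars.find t sub = -1 then -1 else PySem.Chars.find t sub + 1 := by
  simp only [PySem.Chars.find, PySem.Chars.find.go, hnp, Bool.false_eq_true, if_false]
  rw [pvGoShift h t 1]
  norm_num

lemma pvSliceConsSucc {α : Type} {c : α} (l : List α) {i : Int} (hi : 0 ≤ i) :
    PySem.List.slice (c :: l) none (some (i + 1)) = c :: PySem.List.slice l none (some i) := by
  rw [PySem.List.slice_to _ (by omega), PySem.List.slice_to _ hi]
  have : (i + 1).toNat = i.toNat + 1 := by omega
  simp [this]

lemma pvLineA_eq_trunc : ∀ l, pvLineA l = pvTrunc l := by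
  intro l
  induction l with
  | nil =>
    simp [pvLineA, pvTrunc, pvFindNil (show (['\\'] : List Char) ≠ [] by simp),
      pvFindNil (show (['/', '/'] : List Char) ≠ [] by simp)]
  | cons c l ih =>
    by_cases hc : c = '\\'
    · subst hc
      have h1 : PySem.Chars.find ('\\' :: l) ['\\'] = 0 :=
        pvFindConsPrefix (by simp [List.isPrefixOf])
      have hs0 : ∀ (x : List Char) (i : Int), 0 ≤ i → PySem.Chars.slice x none (some i) = List.take i.toNat x :=
        fun x i hi => PySem.List.slice_to x hi
      simp only [pvLineA, pvTrunc, h1, ge_iff_le, le_refl, if_pos]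
      rw [hs0 _ 0 le_rfl]
      split_ifs with h2
      · rw [hs0 _ _ h2]; simp
      · simp
    · by_cases hcc : c = '/' ∧ l.head? = some '/'
      · obtain ⟨rfl, hh⟩ := hcc
        have hp : (['/', '/'] : List Char).isPrefixOf ('/' :: l) = true := by
          cases l with
          | nil => simp at hh
          | cons d r => simp at hh; subst hh; simp [List.isPrefixOf]
        have h2 : PySem.Chars.find ('/' :: l) ['/', '/'] = 0 := pvFindConsPrefix hp
        have hz : ∀ x : List Char, PySem.Chars.slice x none (some 0) = [] := fun x => by
          show PySem.List.slice _ _ _ = _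
          rw [PySem.List.slice_to x le_rfl]; simp
        simp only [pvLineA, pvTrunc, h2, ge_iff_le, le_refl, if_pos, hz]
        simp [hh]
      · -- generic character: line passes through
        have hnp1 : (['\\'] : List Char).isPrefixOf (c :: l) = false := by
          simp [List.isPrefixOf, Ne.symm hc]
        have hnp2 : (['/', '/'] : List Char).isPrefixOf (c :: l) = false := by
          cases l with
          | nil => simp [List.isPrefixOf]
          | cons d r =>
            by_cases h : c = '/'
            · subst h
              have : ¬ d = '/' := fun hd => hcc ⟨rfl, by simp [hd]⟩
              simp [List.isPrefixOf, Ne.symm this]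
            · simp [List.isPrefixOf, Ne.symm h]
        have hf1 := pvFindCons (show (['\\'] : List Char) ≠ [] by simp) hnp1
        have hf2 := pvFindCons (show (['/', '/'] : List Char) ≠ [] by simp) hnp2
        have hge1 := PySem.Chars.neg_one_le_find l ['\\']
        have hge2 := PySem.Chars.neg_one_le_find l ['/', '/']
        have htr : pvTrunc (c :: l) = c :: pvTrunc l := by
          simp [pvTrunc, hc, hcc]
        rw [htr, ← ih]
        simp only [pvLineA, hf1, hf2, ge_iff_le]
        by_cases hm1 : PySem.Chars.find l ['\\'] = -1 <;>
          by_cases hm2 : PySem.Chars.find l ['/', '/'] = -1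
        · rw [hm1, hm2]; norm_num
        · have h2 : (0:Int) ≤ PySem.Chars.find l ['/', '/'] := by omega
          rw [hm1, if_neg hm2]; norm_num
          rw [if_pos (by omega : (0:Int) ≤ PySem.Chars.find l ['/', '/'] + 1),
            if_pos h2, pvSliceConsSucc _ h2]
        · have h1 : (0:Int) ≤ PySem.Chars.find l ['\\'] := by omega
          rw [hm2, if_neg hm1]; norm_num
          rw [if_pos (by omega : (0:Int) ≤ PySem.Chars.find l ['\\'] + 1),
            if_pos h1, pvSliceConsSucc _ h1]
        · have h1 : (0:Int) ≤ PySem.Chars.find l ['\\'] := by omega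
          have h2 : (0:Int) ≤ PySem.Chars.find l ['/', '/'] := by omega
          rw [if_neg hm1, if_neg hm2,
            if_pos (by omega : (0:Int) ≤ PySem.Chars.find l ['/', '/'] + 1),
            if_pos (by omega : (0:Int) ≤ PySem.Chars.find l ['\\'] + 1),
            if_pos h1, if_pos h2]
          simp only [PySem.Chars.slice_eq_listSlice]
          rw [pvSliceConsSucc _ h1, pvSliceConsSucc _ h2]

lemma pvScanSkip : ∀ (l : List Char), '\n' ∉ l → ∀ kept cur pe,
    List.foldl pvStepB (kept, cur, true, pe) (l ++ ['\n']) = (kept ++ pvEmit cur, [], false, false) := by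
  intro l
  induction l with
  | nil =>
    intro _ kept cur pe
    simp only [List.nil_append, List.foldl_cons, List.foldl_nil, pvStepB,
      Bool.not_true, Bool.false_and, Bool.false_eq_true, if_false, pvEmit]
    split_ifs <;> simp_all
  | cons c r ih =>
    intro h kept cur pe
    simp only [List.mem_cons, not_or] at h
    have hstep : pvStepB (kept, cur, true, pe) c = (kept, cur, true, pe) := by
      simp [pvStepB, Ne.symm h.1]
    simp only [List.cons_append, List.foldl_cons, hstep]
    exact ih h.2 kept cur pe

lemma pvScanLine : ∀ (l : List Char), '\n' ∉ l → ∀ kept cur pe,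
    List.foldl pvStepB (kept, cur, false, pe) (l ++ ['\n'])
      = (kept ++ pvEmit (cur ++ (if pe then pvTrunc ('/' :: l) else pvTrunc l)), [], false, false) := by
  intro l
  induction l with
  | nil =>
    intro _ kept cur pe
    cases pe <;>
      simp only [List.nil_append, List.foldl_cons, List.foldl_nil, pvStepB,
        Bool.not_false, Bool.true_and, Bool.false_eq_true, if_false, if_true,
        pvEmit, pvTrunc, if_neg (show ¬('/':Char) = '\\' by decide)] <;>
      [skip; simp only [List.head?_nil, reduceCtorEq, and_false, if_false]] <;>
      split_ifs <;> simp_all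
  | cons c r ih =>
    intro h kept cur pe
    simp only [List.mem_cons, not_or] at h
    obtain ⟨hcn, hr⟩ := h
    by_cases hc1 : c = '\\'
    · subst hc1
      have hstep : ∀ pe, pvStepB (kept, cur, false, pe) '\\'
          = (kept, if pe then cur ++ ['/'] else cur, true, false) := by
        intro pe; simp [pvStepB]
      cases pe <;>
        simp only [List.cons_append, List.foldl_cons, hstep, if_true, if_false,
          Bool.false_eq_true] <;>
        rw [pvScanSkip r hr] <;>
        simp [pvTrunc]
    · by_cases hc2 : c = '/'
      · subst hc2
        cases pe
        · have hstep : pvStepB (kept, cur, false, false) '/' = (kept, cur, false, true) := by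
            simp [pvStepB]
          simp only [List.cons_append, List.foldl_cons, hstep]
          rw [ih hr kept cur true]
          simp
        · have hstep : pvStepB (kept, cur, false, true) '/' = (kept, cur, true, false) := by
            simp [pvStepB]
          simp only [List.cons_append, List.foldl_cons, hstep]
          rw [pvScanSkip r hr]
          simp [pvTrunc]
      · cases pe
        · have hstep : pvStepB (kept, cur, false, false) c = (kept, cur ++ [c], false, false) := by
            simp [pvStepB, Ne.symm hcn, hc1, hc2]
          simp only [List.cons_append, List.foldl_cons, hstep]
          rw [ih hr kept (cur ++ [c]) false]
          simp [pvTrunc, hc1, hc2]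
        · have hstep : pvStepB (kept, cur, false, true) c = (kept, cur ++ ['/', c], false, false) := by
            simp [pvStepB, Ne.symm hcn, hc1, hc2]
          simp only [List.cons_append, List.foldl_cons, hstep]
          rw [ih hr kept (cur ++ ['/', c]) false]
          have h1 : pvTrunc ('/' :: c :: r) = '/' :: c :: pvTrunc r := by
            simp [pvTrunc, hc1, hc2]
          simp [pvTrunc, hc1, hc2]

lemma pvScanAll : ∀ (n : Nat) (s : List Char), s.length ≤ n → ∀ kept,
    List.foldl pvStepB (kept, [], false, false) (s ++ ['\n'])
      = ((pvSplit [] s).foldl (fun acc l => acc ++ pvEmit (pvTrunc l)) kept, [], false, false) := by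
  intro n
  induction n with
  | zero =>
    intro s hs kept
    have : s = [] := List.length_eq_zero_iff.mp (by omega)
    subst this
    rw [pvScanLine [] (by simp) kept [] false]
    simp [pvSplit]
  | succ n ih =>
    intro s hs kept
    rcases pvDecomp s with h | ⟨a, b, rfl, ha⟩
    · rw [pvSplit_no_nl h, pvScanLine s h kept [] false]
      simp
    · rw [pvSplit_app ha b]
      have : (a ++ '\n' :: b) ++ ['\n'] = (a ++ ['\n']) ++ (b ++ ['\n']) := by simp
      rw [this, List.foldl_append, pvScanLine a ha kept [] false]
      simp only [List.nil_append, List.foldl_cons, Bool.false_eq_true, if_false]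
      rw [ih b (by simp at hs; omega) (kept ++ pvEmit (pvTrunc a))]

lemma pvAStep_eq :
    (fun (cleaned_lines : List (List Char)) (line : List Char) =>
      let comment_start_slash := PySem.Chars.find line ['\\']
      let comment_start_double := PySem.Chars.find line ['/', '/']
      let line1 := if comment_start_slash ≥ 0 then
          PySem.Chars.slice line none (some comment_start_slash) else line
      let line2 := if comment_start_double ≥ 0 then
          PySem.Chars.slice line1 none (some comment_start_double) else line1
      if PySem.Chars.strip line2 ≠ [] then cleaned_lines ++ [line2] else cleaned_lines)
    = fun acc l => acc ++ pvEmit (pvTrunc l) := by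
  funext acc l
  rw [← pvLineA_eq_trunc l]
  simp only [pvLineA, pvEmit]
  split_ifs <;> simp

-- ===== VERDICT (by name: the statement is the Claim_ definition above) =====
theorem remove_comments_spec : Claim_equal_remove_comments := by
  intro s _
  unfold Spec_remove_comments remove_comments remove_comments_alt
  rw [pvAStep_eq, pvSplitOn_eq, pvScanAll s.toList.length s.toList le_rfl]
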